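-- pv_equiv track=rewrite | github.com/tsatsulya/llvm_course | trace/stat.py | remove_cyclomatic
-- ===== SOURCE A (Python) =====
-- def is_cyclomatic(a, b):
--     if len(a) != len(b):
--         return False
--
--     for i in range(len(a)):
--         if a[i:] + a[:i] ==  b:
--             return True
--     return False
--
-- def remove_cyclomatic(stat):
--     is_exclusive = [1] * len(stat)
--     for i in range(len(stat)):
--         if not is_exclusive[i]:
--             continue
--         a_list = stat[i][0]
--         for j in range(i + 1, len(stat)):
--             b_list = stat[j][0]
--             if is_cyclomatic(a_list, b_list):
--                 is_exclusive[j] = 0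
--     return [stat[i] for i in range(len(stat)) if is_exclusive[i]]
-- ===== SOURCE B (Python) =====
-- def _canonical(lst):
--     # minimal rotation of lst as a hashable key; () for the empty list
--     if not lst:
--         return ()
--     return min(tuple(lst[i:] + lst[:i]) for i in range(len(lst)))
--
-- def remove_cyclomatic(stat):
--     seen = set()
--     result = []
--     for entry in stat:
--         key = _canonical(entry[0])
--         if key not in seen:
--             seen.add(key)
--             result.append(entry)
--     return result
-- ===== Notes on version B (the rewrite author's own statement) =====
-- stated objective: faster
-- what changed: Replaces A's quadratic pairwise rotation-matching with marker flags by a single pass that canonicalizes each list to its minimal rotation and dedups via a seen-set of canonical keys.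
-- intended difference: On inputs containing two or more entries whose list component is empty, A keeps all of them (its rotation test compares over an empty index range, so [] never matches even itself) while B keeps only the first; deduplicating equal empty lists is the intended behaviour of a duplicate-removal function. — e.g. on remove_cyclomatic([([], 0), ([], 1)]): A returns [([], 0), ([], 1)], B returns [([], 0)]
import Mathlib
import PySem

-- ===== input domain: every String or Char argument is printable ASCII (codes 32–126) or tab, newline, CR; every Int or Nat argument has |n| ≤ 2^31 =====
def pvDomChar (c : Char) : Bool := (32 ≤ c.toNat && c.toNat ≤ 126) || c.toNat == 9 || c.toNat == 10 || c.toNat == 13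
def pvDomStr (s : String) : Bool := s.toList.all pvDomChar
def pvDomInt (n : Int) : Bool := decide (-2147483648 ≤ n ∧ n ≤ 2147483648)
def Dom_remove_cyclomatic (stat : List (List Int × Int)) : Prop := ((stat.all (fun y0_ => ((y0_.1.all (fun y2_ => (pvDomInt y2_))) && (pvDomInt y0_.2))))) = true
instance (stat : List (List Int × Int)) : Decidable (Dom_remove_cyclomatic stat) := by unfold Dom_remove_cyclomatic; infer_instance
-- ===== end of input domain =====

-- B canonicalizes each list to its minimal rotation and dedups with a seen-set in one pass
-- (asymptotically faster in the number of entries than A's pairwise marking).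

-- ===== PORT A =====
def is_cyclomatic (a b : List Int) : Bool :=
  if a.length ≠ b.length then false
  else
    (PySem.List.pyRange 0 (a.length : Int) 1).any
      (fun i => (PySem.List.slice a (some i) none ++ PySem.List.slice a none (some i)) == b)

def remove_cyclomatic (stat : List (List Int × Int)) : List (List Int × Int) :=
  let flags : List Int :=
    (PySem.List.pyRange 0 (stat.length : Int) 1).foldl
      (fun fl i =>
        if PySem.List.pyGetD fl i 0 == 0 then fl
        else
          let a_list := (PySem.List.pyGetD stat i ([], 0)).1
          (PySem.List.pyRange (i + 1) (stat.length : Int) 1).foldl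
            (fun fl2 j =>
              let b_list := (PySem.List.pyGetD stat j ([], 0)).1
              if is_cyclomatic a_list b_list then PySem.List.pySetD fl2 j 0 else fl2)
            fl)
      (List.replicate stat.length (1 : Int))
  ((PySem.List.pyRange 0 (stat.length : Int) 1).filter
      (fun i => PySem.List.pyGetD flags i 0 != 0)).map
    (fun i => PySem.List.pyGetD stat i ([], 0))

-- ===== PORT B =====
def pvCanonical (lst : List Int) : List Int :=
  if lst = [] then []
  else
    -- min of a nonempty generator of rotations; the `.getD []` default is never reached
    (PySem.List.min?
        ((PySem.List.pyRange 0 (lst.length : Int) 1).map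
          (fun i => PySem.List.slice lst (some i) none ++ PySem.List.slice lst none (some i)))
        (fun r => r)).getD []

def remove_cyclomatic_alt (stat : List (List Int × Int)) : List (List Int × Int) :=
  (stat.foldl
    (fun (acc : PySem.Set (List Int) × List (List Int × Int)) entry =>
      let key := pvCanonical entry.1
      if PySem.Set.contains acc.1 key then acc
      else (PySem.Set.add acc.1 key, acc.2 ++ [entry]))
    (PySem.Set.empty, [])).2

-- ===== PRECONDITION & SPEC =====
-- On inputs with two or more entries whose list component is empty, A keeps all of them (its
-- rotation test never matches an empty list, not even against itself) while B keeps only the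
-- first; deduplicating equal empty lists is the intended behaviour of duplicate removal.
def D_remove_cyclomatic (stat : List (List Int × Int)) : Prop :=
  2 ≤ stat.countP (fun e => e.1 == [])
instance (stat : List (List Int × Int)) : Decidable (D_remove_cyclomatic stat) := by
  unfold D_remove_cyclomatic; infer_instance

def Spec_remove_cyclomatic (stat : List (List Int × Int)) (out : List (List Int × Int)) : Prop :=
  ¬ D_remove_cyclomatic stat → out = remove_cyclomatic_alt stat
instance (stat : List (List Int × Int)) (out : List (List Int × Int)) : Decidable (Spec_remove_cyclomatic stat out) := by unfold Spec_remove_cyclomatic; infer_instance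

def pvDiffWitness_remove_cyclomatic : (List (List Int × Int)) := [([], 0), ([], 1)]
def pvDiffWitnessOut_remove_cyclomatic : (List (List Int × Int)) × (List (List Int × Int)) :=
  ([([], 0), ([], 1)], [([], 0)])

-- ===== CLAIM (what is proved, stated in full; the proofs are below) =====
def Claim_unchanged_remove_cyclomatic : Prop := ∀ (stat : List (List Int × Int)), Dom_remove_cyclomatic stat → Spec_remove_cyclomatic stat (remove_cyclomatic stat)
def Claim_changed_remove_cyclomatic : Prop := Dom_remove_cyclomatic (pvDiffWitness_remove_cyclomatic) ∧ D_remove_cyclomatic (pvDiffWitness_remove_cyclomatic) ∧ remove_cyclomatic (pvDiffWitness_remove_cyclomatic) = pvDiffWitnessOut_remove_cyclomatic.1 ∧ remove_cyclomatic_alt (pvDiffWitness_remove_cyclomatic) = pvDiffWitnessOut_remove_cyclomatic.2 ∧ pvDiffWitnessOut_remove_cyclomatic.1 ≠ pvDiffWitnessOut_remove_cyclomatic.2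
def Claim_exact_remove_cyclomatic : Prop := ∀ (stat : List (List Int × Int)), Dom_remove_cyclomatic stat → D_remove_cyclomatic stat → remove_cyclomatic stat ≠ remove_cyclomatic_alt stat

-- ===== LEMMAS AND PROOFS =====

def rotsOf (a : List Int) : List (List Int) := (List.range a.length).map (fun k => a.rotate k)


def pvMinStep (acc : Option (List Int)) (x : List Int) : Option (List Int) :=
  match acc with
  | none => some x
  | some m => @ite _ (@LT.lt _ List.instLT x m) (List.decidableLT x m) (some x) (some m)


lemma lt_bridge (x y : List Int) : (@LT.lt _ List.instLT x y) ↔ x < y := by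
  show List.lt x y ↔ _
  rw [List.lt_iff_lex_lt]; rfl

lemma min?_eq_foldl_pvMinStep (xs : List (List Int)) :
    @PySem.List.min? (List Int) (List Int) List.instLT (fun a b => List.decidableLT a b) xs (fun r => r)
      = List.foldl pvMinStep none xs := by
  unfold PySem.List.min? pvMinStep
  congr 1
  funext acc x
  cases acc <;> rfl

lemma rots_port (a : List Int) :
    ((PySem.List.pyRange 0 (a.length : Int) 1).map
      (fun i => PySem.List.slice a (some i) none ++ PySem.List.slice a none (some i))) = rotsOf a := by
  rw [PySem.List.pyRange_one]
  simp only [Int.sub_zero, Int.toNat_natCast, List.map_map, rotsOf]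
  apply List.map_congr_left
  intro k hk
  simp only [Function.comp_apply, Int.zero_add]
  rw [PySem.List.slice_from_natCast, PySem.List.slice_to_natCast,
      List.rotate_eq_drop_append_take (Nat.le_of_lt (List.mem_range.mp hk))]

lemma foldlmin_aux (xs : List (List Int)) : ∀ (m0 m : List Int),
    List.foldl pvMinStep (some m0) xs = some m →
    (m ∈ xs ∨ m = m0) ∧ m ≤ m0 ∧ ∀ y ∈ xs, m ≤ y := by
  induction xs with
  | nil => intro m0 m h; simp_all
  | cons x t ih =>
    intro m0 m h
    simp only [List.foldl_cons] at h
    rw [show pvMinStep (some m0) x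
        = @ite _ (@LT.lt _ List.instLT x m0) (List.decidableLT x m0) (some x) (some m0) from rfl] at h
    by_cases hx : x < m0
    · rw [if_pos ((lt_bridge x m0).mpr hx)] at h
      obtain ⟨h1, h2, h3⟩ := ih x m h
      refine ⟨?_, le_trans h2 (le_of_lt hx), ?_⟩
      · rcases h1 with h1 | h1
        · exact Or.inl (List.mem_cons_of_mem _ h1)
        · exact Or.inl (h1 ▸ List.mem_cons_self)
      · intro y hy
        rcases List.mem_cons.mp hy with rfl | hy
        · exact h2
        · exact h3 y hy
    · rw [if_neg (fun hc => hx ((lt_bridge x m0).mp hc))] at h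
      obtain ⟨h1, h2, h3⟩ := ih m0 m h
      refine ⟨?_, h2, ?_⟩
      · rcases h1 with h1 | h1
        · exact Or.inl (List.mem_cons_of_mem _ h1)
        · exact Or.inr h1
      · intro y hy
        rcases List.mem_cons.mp hy with rfl | hy
        · exact le_trans h2 (not_lt.mp hx)
        · exact h3 y hy

lemma min?_id_spec {xs : List (List Int)} {m : List Int}
    (h : List.foldl pvMinStep none xs = some m) : m ∈ xs ∧ ∀ y ∈ xs, m ≤ y := by
  cases xs with
  | nil => simp at h
  | cons x t =>
    simp only [List.foldl_cons] at h
    rw [show pvMinStep none x = some x from rfl] at h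
    obtain ⟨h1, h2, h3⟩ := foldlmin_aux t x m h
    refine ⟨?_, ?_⟩
    · rcases h1 with h1 | h1
      · exact List.mem_cons_of_mem _ h1
      · exact h1 ▸ List.mem_cons_self
    · intro y hy
      rcases List.mem_cons.mp hy with rfl | hy
      · exact h2
      · exact h3 y hy

lemma foldl_pvMinStep_ne_none (xs : List (List Int)) (hx : xs ≠ []) :
    List.foldl pvMinStep none xs ≠ none := by
  cases xs with
  | nil => exact absurd rfl hx
  | cons x t =>
    simp only [List.foldl_cons]
    rw [show pvMinStep none x = some x from rfl]
    clear hx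
    induction t generalizing x with
    | nil => simp
    | cons y t ih =>
      simp only [List.foldl_cons]
      rw [show pvMinStep (some x) y
          = @ite _ (@LT.lt _ List.instLT y x) (List.decidableLT y x) (some y) (some x) from rfl]
      split
      · exact ih y
      · exact ih x

-- pvCanonical of a nonempty list: member of rotsOf and minimal
lemma pvCanonical_eq_min (a : List Int) (ha : a ≠ []) :
    List.foldl pvMinStep none (rotsOf a) = some (pvCanonical a) := by
  have hne : rotsOf a ≠ [] := by
    simp [rotsOf, List.range_eq_nil, List.length_eq_zero_iff, ha]
  rcases Option.ne_none_iff_exists'.mp (foldl_pvMinStep_ne_none _ hne) with ⟨m, hm⟩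
  rw [hm, pvCanonical, if_neg ha, min?_eq_foldl_pvMinStep, rots_port, hm]
  rfl

lemma pvCanonical_mem (a : List Int) (ha : a ≠ []) : pvCanonical a ∈ rotsOf a :=
  (min?_id_spec (pvCanonical_eq_min a ha)).1

lemma pvCanonical_min (a : List Int) (ha : a ≠ []) : ∀ y ∈ rotsOf a, pvCanonical a ≤ y :=
  (min?_id_spec (pvCanonical_eq_min a ha)).2

lemma mem_rotsOf {a y : List Int} : y ∈ rotsOf a ↔ ∃ k < a.length, y = a.rotate k := by
  simp only [rotsOf, List.mem_map, List.mem_range]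
  constructor
  · rintro ⟨k, hk, rfl⟩; exact ⟨k, hk, rfl⟩
  · rintro ⟨k, hk, rfl⟩; exact ⟨k, hk, rfl⟩

lemma rotate_mem_rotsOf (b : List Int) (hb : b ≠ []) (m : Nat) : b.rotate m ∈ rotsOf b := by
  have hn : 0 < b.length := List.length_pos_iff.mpr hb
  exact mem_rotsOf.mpr ⟨m % b.length, Nat.mod_lt _ hn, (List.rotate_mod b m).symm⟩

lemma rotate_inv (a : List Int) (ha : a ≠ []) (k : Nat) :
    (a.rotate k).rotate (a.length - k % a.length) = a := by
  have hn : 0 < a.length := List.length_pos_iff.mpr ha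
  rw [List.rotate_rotate, ← List.rotate_mod]
  have h2 := Nat.div_add_mod k a.length
  have h3 : k % a.length < a.length := Nat.mod_lt _ hn
  have h4 : k + (a.length - k % a.length) = a.length * (k / a.length) + a.length := by omega
  rw [h4, ← Nat.mul_succ, Nat.mul_mod_right, List.rotate_zero]

lemma mem_rotsOf_rotate {a : List Int} (ha : a ≠ []) (k : Nat) :
    ∀ y, y ∈ rotsOf (a.rotate k) ↔ y ∈ rotsOf a := by
  have hrk : a.rotate k ≠ [] := by
    intro h; exact ha (by simpa using congrArg List.length h)
  intro y
  constructor
  · intro hy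
    rcases mem_rotsOf.mp hy with ⟨j, hj, rfl⟩
    rw [List.rotate_rotate]
    exact rotate_mem_rotsOf a ha _
  · intro hy
    rcases mem_rotsOf.mp hy with ⟨j, hj, rfl⟩
    have hmem := rotate_mem_rotsOf _ hrk (a.length - k % a.length + j)
    rw [← List.rotate_rotate, rotate_inv a ha k] at hmem
    exact hmem

lemma pvCanonical_rotate (a : List Int) (ha : a ≠ []) (k : Nat) :
    pvCanonical (a.rotate k) = pvCanonical a := by
  have hrk : a.rotate k ≠ [] := by
    intro h; exact ha (by simpa using congrArg List.length h)
  have h1 := pvCanonical_mem _ hrk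
  have h2 := pvCanonical_min _ hrk
  have h3 := pvCanonical_mem a ha
  have h4 := pvCanonical_min a ha
  have hmem := mem_rotsOf_rotate ha k
  exact le_antisymm (h2 _ ((hmem _).mpr h3)) (h4 _ ((hmem _).mp h1))



lemma pvCanonical_nil : pvCanonical [] = [] := by simp [pvCanonical]

lemma pvCanonical_length (a : List Int) (ha : a ≠ []) : (pvCanonical a).length = a.length := by
  rcases mem_rotsOf.mp (pvCanonical_mem a ha) with ⟨k, _, hk⟩
  rw [hk, List.length_rotate]

lemma pvCanonical_eq_nil_iff (a : List Int) : pvCanonical a = [] ↔ a = [] := by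
  constructor
  · intro h
    by_contra ha
    have := pvCanonical_length a ha
    rw [h] at this
    exact ha (List.length_eq_zero_iff.mp this.symm)
  · rintro rfl; exact pvCanonical_nil

lemma cyc_exists_iff (a b : List Int) :
    is_cyclomatic a b = true ↔ a.length = b.length ∧ ∃ k < a.length, a.rotate k = b := by
  unfold is_cyclomatic
  split
  · rename_i h
    simp only [Bool.false_eq_true, false_iff]
    intro hc; exact h hc.1
  · rename_i h
    rw [not_ne_iff] at h
    simp only [h, true_and, List.any_eq_true]
    constructor
    · rintro ⟨i, hi, hb⟩
      rw [PySem.List.mem_pyRange_one] at hi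
      obtain ⟨hi0, hi1⟩ := hi
      refine ⟨i.toNat, by omega, ?_⟩
      have hb' := beq_iff_eq.mp hb
      rw [PySem.List.slice_from a hi0, PySem.List.slice_to a hi0] at hb'
      rw [List.rotate_eq_drop_append_take (by omega)]
      exact hb'
    · rintro ⟨k, hk, hb⟩
      refine ⟨(k : Int), PySem.List.mem_pyRange_one.mpr (by omega), ?_⟩
      rw [PySem.List.slice_from_natCast, PySem.List.slice_to_natCast, beq_iff_eq,
          ← List.rotate_eq_drop_append_take (show k ≤ a.length by omega)]
      exact hb

lemma cyc_iff_canonical (a b : List Int) :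
    is_cyclomatic a b = true ↔ (a ≠ [] ∧ pvCanonical a = pvCanonical b) := by
  rw [cyc_exists_iff]
  constructor
  · rintro ⟨hlen, k, hk, rfl⟩
    have ha : a ≠ [] := by
      intro h; subst h; simp at hk
    exact ⟨ha, (pvCanonical_rotate a ha k).symm⟩
  · rintro ⟨ha, hC⟩
    have hb : b ≠ [] := by
      intro h; subst h
      rw [pvCanonical_nil] at hC
      exact ha ((pvCanonical_eq_nil_iff a).mp hC)
    have hlen : a.length = b.length := by
      have h1 := pvCanonical_length a ha
      have h2 := pvCanonical_length b hb
      rw [hC] at h1; omega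
    rcases mem_rotsOf.mp (pvCanonical_mem b hb) with ⟨q, hq, hq2⟩
    rcases mem_rotsOf.mp (pvCanonical_mem a ha) with ⟨p, hp, hpa⟩
    have hCb_ne : pvCanonical b ≠ [] := by
      rw [Ne, pvCanonical_eq_nil_iff]; exact hb
    have h3 : (pvCanonical b).rotate (b.length - q % b.length) = b := by
      rw [hq2]; exact rotate_inv b hb q
    have h1 : b ∈ rotsOf (pvCanonical b) := by
      have h2 := rotate_mem_rotsOf (pvCanonical b) hCb_ne (b.length - q % b.length)
      rw [h3] at h2; exact h2
    have hbmem : b ∈ rotsOf a := by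
      rw [← hC, hpa] at h1
      exact (mem_rotsOf_rotate ha p b).mp h1
    rcases mem_rotsOf.mp hbmem with ⟨k, hk, hkb⟩
    exact ⟨hlen, k, hk, hkb.symm⟩


def entryOf (stat : List (List Int × Int)) (j : Nat) : List Int × Int := stat.getD j ([], 0)

def keptA (stat : List (List Int × Int)) (j : Nat) : Bool :=
  !((List.range j).attach.any (fun i =>
      keptA stat i.1 && is_cyclomatic (entryOf stat i.1).1 (entryOf stat j).1))
termination_by j
decreasing_by exact List.mem_range.mp i.2

lemma keptA_eq_true_iff (stat : List (List Int × Int)) (j : Nat) :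
    keptA stat j = true ↔
      ∀ i < j, ¬(keptA stat i = true ∧
        is_cyclomatic (entryOf stat i).1 (entryOf stat j).1 = true) := by
  rw [keptA]
  simp only [Bool.not_eq_eq_eq_not, Bool.not_true, List.any_eq_false]
  constructor
  · intro h i hi hand
    have h2 := h ⟨i, List.mem_range.mpr hi⟩ (List.mem_attach _ _)
    rw [hand.1, hand.2] at h2
    simp at h2
  · intro h i _
    have h2 := h i.1 (List.mem_range.mp i.2)
    by_cases hk : keptA stat i.1 = true
    · by_cases hc : is_cyclomatic (entryOf stat i.1).1 (entryOf stat j).1 = true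
      · exact absurd ⟨hk, hc⟩ h2
      · simp [hc]
    · simp [hk]

lemma getD_set_zero (fl : List Int) (t q : Nat) :
    (fl.set t 0).getD q 0 = if q = t then 0 else fl.getD q 0 := by
  by_cases hq : q = t
  · subst hq
    by_cases hlen : q < fl.length
    · simp [List.getD_eq_getElem?_getD, hlen]
    · rw [if_pos rfl]
      have h1 : fl.set q 0 = fl := List.set_eq_of_length_le (by omega)
      rw [h1, List.getD_eq_getElem?_getD, List.getElem?_eq_none (by omega)]
      rfl
  · simp [List.getD_eq_getElem?_getD, Ne.symm hq, hq]

lemma setfold_length (stat : List (List Int × Int)) (al : List Int) :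
    ∀ (L : List Int) (fl : List Int),
      (L.foldl (fun fl2 j =>
        if is_cyclomatic al (PySem.List.pyGetD stat j ([], 0)).1
        then PySem.List.pySetD fl2 j 0 else fl2) fl).length = fl.length := by
  intro L
  induction L with
  | nil => intro fl; rfl
  | cons j L ih =>
    intro fl
    simp only [List.foldl_cons]
    rw [ih]
    split
    · exact PySem.List.length_pySetD _ _ _
    · rfl

lemma setfold_getD (stat : List (List Int × Int)) (al : List Int) (q : Nat) :
    ∀ (L : List Int) (fl : List Int), (∀ j ∈ L, 0 ≤ j) →
      (L.foldl (fun fl2 j =>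
        if is_cyclomatic al (PySem.List.pyGetD stat j ([], 0)).1
        then PySem.List.pySetD fl2 j 0 else fl2) fl).getD q 0
      = if ((q : Int) ∈ L ∧ is_cyclomatic al (entryOf stat q).1 = true)
        then (0 : Int) else fl.getD q 0 := by
  intro L
  induction L with
  | nil => intro fl _; simp
  | cons j L ih =>
    intro fl hL
    have hj0 : (0 : Int) ≤ j := hL j List.mem_cons_self
    simp only [List.foldl_cons]
    rw [ih _ (fun x hx => hL x (List.mem_cons_of_mem _ hx))]
    have hstep : ((if is_cyclomatic al (PySem.List.pyGetD stat j ([], 0)).1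
        then PySem.List.pySetD fl j 0 else fl) : List Int).getD q 0
        = if ((q : Int) = j ∧ is_cyclomatic al (entryOf stat q).1 = true)
          then (0 : Int) else fl.getD q 0 := by
      by_cases hqj : (q : Int) = j
      · have hjq : j.toNat = q := by omega
        rw [PySem.List.pyGetD_of_nonneg _ _ hj0, hjq]
        split
        · rename_i hc
          rw [PySem.List.pySetD_of_nonneg _ _ hj0, hjq, getD_set_zero, if_pos rfl,
              if_pos ⟨hqj, hc⟩]
        · rename_i hc
          rw [if_neg (fun hand => hc hand.2)]
      · split
        · rw [PySem.List.pySetD_of_nonneg _ _ hj0, getD_set_zero,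
              if_neg (fun h => hqj (by omega)), if_neg (fun hand => hqj hand.1)]
        · rw [if_neg (fun hand => hqj hand.1)]
    rw [hstep]
    by_cases hc : is_cyclomatic al (entryOf stat q).1 = true
    · by_cases hmem : (q : Int) ∈ L
      · rw [if_pos ⟨hmem, hc⟩, if_pos ⟨List.mem_cons_of_mem _ hmem, hc⟩]
      · by_cases hqj : (q : Int) = j
        · rw [if_neg (fun h => hmem h.1), if_pos ⟨hqj, hc⟩,
              if_pos ⟨List.mem_cons.mpr (Or.inl hqj), hc⟩]
        · rw [if_neg (fun h => hmem h.1), if_neg (fun h => hqj h.1),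
              if_neg (fun h => (List.mem_cons.mp h.1).elim hqj hmem)]
    · rw [if_neg (fun h => hc h.2), if_neg (fun h => hc h.2), if_neg (fun h => hc h.2)]

def outerStep (stat : List (List Int × Int)) (fl : List Int) (i : Int) : List Int :=
  if PySem.List.pyGetD fl i 0 == 0 then fl
  else
    (PySem.List.pyRange (i + 1) (stat.length : Int) 1).foldl
      (fun fl2 j =>
        if is_cyclomatic (PySem.List.pyGetD stat i ([], 0)).1 (PySem.List.pyGetD stat j ([], 0)).1
        then PySem.List.pySetD fl2 j 0 else fl2)
      fl

def outerFold (stat : List (List Int × Int)) (t : Nat) : List Int :=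
  (PySem.List.pyRange 0 (t : Int) 1).foldl (outerStep stat) (List.replicate stat.length (1 : Int))

lemma port_eq (stat : List (List Int × Int)) :
    remove_cyclomatic stat
      = ((PySem.List.pyRange 0 (stat.length : Int) 1).filter
          (fun i => PySem.List.pyGetD (outerFold stat stat.length) i 0 != 0)).map
        (fun i => PySem.List.pyGetD stat i ([], 0)) := rfl

lemma outerFold_char (stat : List (List Int × Int)) :
    ∀ (t : Nat), t ≤ stat.length →
      (outerFold stat t).length = stat.length ∧
      ∀ q : Nat, q < stat.length →
        (outerFold stat t).getD q 0 =
          if (∃ i, i < t ∧ i < q ∧ keptA stat i = true ∧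
              is_cyclomatic (entryOf stat i).1 (entryOf stat q).1 = true)
          then (0 : Int) else 1 := by
  intro t
  induction t with
  | zero =>
    intro _
    constructor
    · simp [outerFold]
    · intro q hq
      rw [if_neg (by rintro ⟨i, hi, _⟩; omega)]
      simp [outerFold, List.getD_eq_getElem?_getD, hq]
  | succ t ih =>
    intro ht
    obtain ⟨ihlen, ihval⟩ := ih (by omega)
    have hsplit : outerFold stat (t + 1) = outerStep stat (outerFold stat t) (t : Int) := by
      rw [outerFold, outerFold, show ((t + 1 : Nat) : Int) = (t : Int) + 1 by push_cast; ring,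
          PySem.List.pyRange_one_succ_right (by positivity), List.foldl_append]
      rfl
    have htn : t < stat.length := by omega
    have hflt : (outerFold stat t).getD t 0 =
        if keptA stat t = true then (1 : Int) else 0 := by
      rw [ihval t htn]
      by_cases hk : keptA stat t = true
      · rw [if_neg, if_pos hk]
        rintro ⟨i, hi1, hi2, hi3, hi4⟩
        exact (keptA_eq_true_iff stat t).mp hk i hi2 ⟨hi3, hi4⟩
      · rw [if_pos, if_neg hk]
        rw [keptA_eq_true_iff] at hk
        push Not at hk
        obtain ⟨i, hi, h1, h2⟩ := hk
        exact ⟨i, hi, hi, h1, h2⟩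
    rw [hsplit, outerStep]
    rw [PySem.List.pyGetD_natCast, hflt]
    by_cases hk : keptA stat t = true
    · rw [if_pos hk, if_neg (by simp)]
      constructor
      · rw [setfold_length, ihlen]
      · intro q hq
        rw [setfold_getD stat _ q _ _
            (fun j hj => by have := PySem.List.mem_pyRange_one.mp hj; omega)]
        rw [ihval q hq]
        rw [PySem.List.pyGetD_natCast]
        have hmem : ((q : Int) ∈ PySem.List.pyRange ((t : Int) + 1) (stat.length : Int)) ↔ t < q := by
          rw [PySem.List.mem_pyRange_one]; omega
        by_cases h1 : t < q ∧ is_cyclomatic (entryOf stat t).1 (entryOf stat q).1 = true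
        · rw [if_pos ⟨hmem.mpr h1.1, by
              show is_cyclomatic (stat.getD t ([], 0)).1 (entryOf stat q).1 = true
              exact h1.2⟩]
          rw [if_pos ⟨t, by omega, h1.1, hk, h1.2⟩]
        · have h2 : ¬((q : Int) ∈ PySem.List.pyRange ((t : Int) + 1) (stat.length : Int) ∧
              is_cyclomatic (stat.getD t ([], 0)).1 (entryOf stat q).1 = true) := by
            rintro ⟨hm, hc⟩
            exact h1 ⟨hmem.mp hm, hc⟩
          rw [if_neg h2]
          have h3 : (∃ i, i < t ∧ i < q ∧ keptA stat i = true ∧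
              is_cyclomatic (entryOf stat i).1 (entryOf stat q).1 = true) ↔
              (∃ i, i < t + 1 ∧ i < q ∧ keptA stat i = true ∧
              is_cyclomatic (entryOf stat i).1 (entryOf stat q).1 = true) := by
            constructor
            · rintro ⟨i, hi1, hi2, hi3, hi4⟩; exact ⟨i, by omega, hi2, hi3, hi4⟩
            · rintro ⟨i, hi1, hi2, hi3, hi4⟩
              rcases Nat.lt_succ_iff_lt_or_eq.mp hi1 with hi | rfl
              · exact ⟨i, hi, hi2, hi3, hi4⟩
              · exact absurd ⟨hi2, hi4⟩ h1
          rw [if_congr h3 rfl rfl]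
    · rw [if_neg hk, if_pos (by simp)]
      refine ⟨ihlen, fun q hq => ?_⟩
      rw [ihval q hq]
      apply if_congr _ rfl rfl
      constructor
      · rintro ⟨i, hi1, hi2, hi3, hi4⟩; exact ⟨i, by omega, hi2, hi3, hi4⟩
      · rintro ⟨i, hi1, hi2, hi3, hi4⟩
        rcases Nat.lt_succ_iff_lt_or_eq.mp hi1 with hi | rfl
        · exact ⟨i, hi, hi2, hi3, hi4⟩
        · exact absurd hi3 (by simpa using hk)

lemma A_char (stat : List (List Int × Int)) :
    remove_cyclomatic stat
      = ((List.range stat.length).filter (fun q => keptA stat q)).map (entryOf stat) := by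
  rw [port_eq, PySem.List.pyRange_one]
  simp only [Int.sub_zero, Int.toNat_natCast, List.filter_map, List.map_map]
  have hcong : ∀ q ∈ List.range stat.length,
      ((fun i => PySem.List.pyGetD (outerFold stat stat.length) i 0 != 0) ∘
        (fun k : Nat => (0 : Int) + k)) q = keptA stat q := by
    intro q hq
    have hq' := List.mem_range.mp hq
    obtain ⟨_, hval⟩ := outerFold_char stat stat.length le_rfl
    simp only [Function.comp_apply, Int.zero_add, PySem.List.pyGetD_natCast]
    rw [hval q hq']
    by_cases hk : keptA stat q = true
    · rw [if_neg, hk]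
      · simp
      · rintro ⟨i, _, hi2, hi3, hi4⟩
        exact (keptA_eq_true_iff stat q).mp hk i hi2 ⟨hi3, hi4⟩
    · rw [if_pos, Bool.eq_false_iff.mpr hk]
      · simp
      · rw [keptA_eq_true_iff] at hk
        push Not at hk
        obtain ⟨i, hi, h1, h2⟩ := hk
        exact ⟨i, by omega, hi, h1, h2⟩
  rw [List.filter_congr hcong]
  apply List.map_congr_left
  intro q hq
  have hq' := List.mem_range.mp (List.mem_of_mem_filter hq)
  simp only [Function.comp_apply, Int.zero_add, PySem.List.pyGetD_natCast]
  rfl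


def bGo (seen : List (List Int)) : List (List Int × Int) → List (List Int × Int)
  | [] => []
  | e :: rest =>
    if pvCanonical e.1 ∈ seen then bGo seen rest
    else e :: bGo (seen ++ [pvCanonical e.1]) rest

lemma foldl_bGo : ∀ (l : List (List Int × Int)) (s : List (List Int))
    (acc : List (List Int × Int)),
    (l.foldl
      (fun (acc : PySem.Set (List Int) × List (List Int × Int)) entry =>
        let key := pvCanonical entry.1
        if PySem.Set.contains acc.1 key then acc
        else (PySem.Set.add acc.1 key, acc.2 ++ [entry]))
      (s, acc)).2 = acc ++ bGo s l := by
  intro l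
  induction l with
  | nil => intro s acc; simp [bGo]
  | cons e rest ih =>
    intro s acc
    simp only [List.foldl_cons, bGo]
    by_cases hmem : pvCanonical e.1 ∈ s
    · rw [if_pos ((PySem.Set.contains_iff _ _).mpr hmem), if_pos hmem]
      exact ih s acc
    · rw [if_neg (fun hc => hmem ((PySem.Set.contains_iff _ _).mp hc)), if_neg hmem,
          PySem.Set.add_of_not_mem hmem]
      rw [ih _ _]
      simp
lemma alt_eq_bGo (stat : List (List Int × Int)) :
    remove_cyclomatic_alt stat = bGo [] stat := by
  rw [remove_cyclomatic_alt]
  exact foldl_bGo stat [] []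

def bKeep (seen : List (List Int)) (l : List (List Int × Int)) (q : Nat) : Bool :=
  decide (pvCanonical ((l.getD q ([], 0)).1) ∉ seen) &&
  !((List.range q).any (fun i =>
      pvCanonical ((l.getD i ([], 0)).1) == pvCanonical ((l.getD q ([], 0)).1)))

lemma bKeep_shift (e : List Int × Int) (rest : List (List Int × Int))
    (seen : List (List Int)) (q : Nat) :
    bKeep seen (e :: rest) (q + 1)
      = (if pvCanonical e.1 ∈ seen then bKeep seen rest q
         else bKeep (seen ++ [pvCanonical e.1]) rest q) := by
  simp only [bKeep, List.getD_cons_succ, List.getD_cons_zero, List.range_succ_eq_map,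
    List.any_cons, List.any_map]
  by_cases hKe : pvCanonical e.1 = pvCanonical ((rest.getD q ([], 0)).1)
  · by_cases hmem : pvCanonical e.1 ∈ seen <;>
      simp_all [List.mem_append, Function.comp_def, List.getElem?_cons_succ]
  · have hbe : (pvCanonical e.1 == pvCanonical ((rest.getD q ([], 0)).1)) = false := by
      simpa using hKe
    have hne : ¬ (pvCanonical ((rest.getD q ([], 0)).1) = pvCanonical e.1) :=
      fun h => hKe h.symm
    rw [hbe]
    have hany : ((List.range q).any
        ((fun i => pvCanonical (((e :: rest).getD i ([], 0)).1)
            == pvCanonical ((rest.getD q ([], 0)).1)) ∘ Nat.succ))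
        = ((List.range q).any (fun i => pvCanonical ((rest.getD i ([], 0)).1)
            == pvCanonical ((rest.getD q ([], 0)).1))) :=
      congrArg (List.any (List.range q))
        (funext (fun i => by simp))
    rw [hany]
    have hne' : ¬ pvCanonical ((rest[q]?.getD ([], 0)).1) = pvCanonical e.1 := by
      simpa [List.getD_eq_getElem?_getD] using hne
    by_cases hmem : pvCanonical e.1 ∈ seen
    · simp [hmem]
    · simp [hmem, List.mem_append, hne']

lemma bGo_char : ∀ (l : List (List Int × Int)) (seen : List (List Int)),
    bGo seen l = ((List.range l.length).filter (bKeep seen l)).map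
      (fun q => l.getD q ([], 0)) := by
  intro l
  induction l with
  | nil => intro seen; simp [bGo]
  | cons e rest ih =>
    intro seen
    rw [List.length_cons, List.range_succ_eq_map, List.filter_cons]
    by_cases hmem : pvCanonical e.1 ∈ seen
    · have h0 : bKeep seen (e :: rest) 0 = false := by
        simp [bKeep, hmem]
      rw [bGo, if_pos hmem, h0]
      simp only [Bool.false_eq_true, if_false]
      rw [List.filter_map, List.map_map]
      rw [List.filter_congr (fun q (_ : q ∈ List.range rest.length) => by
        show bKeep seen (e :: rest) (Nat.succ q) = bKeep seen rest q
        rw [Nat.succ_eq_add_one, bKeep_shift, if_pos hmem])]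
      rw [ih seen]
      exact List.map_congr_left (fun q _ => by simp [Function.comp])
    · have h0 : bKeep seen (e :: rest) 0 = true := by
        simp [bKeep, hmem]
      rw [bGo, if_neg hmem, h0]
      simp only [if_true]
      rw [List.map_cons, List.getD_cons_zero]
      congr 1
      rw [List.filter_map, List.map_map]
      rw [List.filter_congr (fun q (_ : q ∈ List.range rest.length) => by
        show bKeep seen (e :: rest) (Nat.succ q) = bKeep (seen ++ [pvCanonical e.1]) rest q
        rw [Nat.succ_eq_add_one, bKeep_shift, if_neg hmem])]
      rw [ih (seen ++ [pvCanonical e.1])]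
      exact List.map_congr_left (fun q _ => by simp [Function.comp])


lemma countP_two (stat : List (List Int × Int)) (i j : Nat) (hij : i < j)
    (hj : j < stat.length) (hi' : (entryOf stat i).1 = []) (hj' : (entryOf stat j).1 = []) :
    D_remove_cyclomatic stat := by
  unfold D_remove_cyclomatic
  have hi : i < stat.length := lt_trans hij hj
  rw [show stat = stat.take j ++ stat.drop j from (List.take_append_drop j stat).symm,
      List.countP_append]
  have h1 : 0 < (stat.take j).countP (fun e => e.1 == []) := by
    rw [List.countP_pos_iff]
    refine ⟨stat[i], ?_, ?_⟩
    · rw [show stat[i] = (stat.take j)[i]'(by simp [List.length_take]; omega) from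
        (List.getElem_take).symm]
      exact List.getElem_mem _
    · have : entryOf stat i = stat[i] := List.getD_eq_getElem _ _ hi
      rw [← this]; simpa using hi'
  have h2 : 0 < (stat.drop j).countP (fun e => e.1 == []) := by
    rw [List.countP_pos_iff]
    refine ⟨stat[j], ?_, ?_⟩
    · rw [show stat[j] = (stat.drop j)[0]'(by simp; omega) from by
        simp]
      exact List.getElem_mem _
    · have : entryOf stat j = stat[j] := List.getD_eq_getElem _ _ hj
      rw [← this]; simpa using hj'
  omega

lemma bKeep_nil_iff (stat : List (List Int × Int)) (q : Nat) :
    bKeep [] stat q = true ↔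
      ∀ i < q, ¬ (pvCanonical ((entryOf stat i).1) = pvCanonical ((entryOf stat q).1)) := by
  unfold bKeep
  simp [List.any_eq_false, List.mem_range, entryOf]

lemma kept_eq_bKeep (stat : List (List Int × Int)) (hD : ¬ D_remove_cyclomatic stat) :
    ∀ q, q < stat.length → keptA stat q = bKeep [] stat q := by
  intro q
  induction q using Nat.strong_induction_on with
  | _ q ih =>
    intro hq
    rw [Bool.eq_iff_iff, keptA_eq_true_iff, bKeep_nil_iff]
    constructor
    · intro h i hi hKeq
      -- there is some earlier index with the same key; take the least one
      have hex : ∃ m, m < q ∧ pvCanonical ((entryOf stat m).1) = pvCanonical ((entryOf stat q).1) :=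
        ⟨i, hi, hKeq⟩
      classical
      let P : Nat → Prop := fun m =>
        m < q ∧ pvCanonical ((entryOf stat m).1) = pvCanonical ((entryOf stat q).1)
      have hP : ∃ m, P m := hex
      have hfind := Nat.find_spec hP
      have hmin := fun m hm => Nat.find_min hP (m := m) hm
      set m0 := Nat.find hP with hm0
      obtain ⟨hm0q, hm0K⟩ := hfind
      have hkm0 : keptA stat m0 = true := by
        rw [ih m0 hm0q (lt_trans hm0q hq), bKeep_nil_iff]
        intro m hm hKm
        exact hmin m hm ⟨lt_trans hm hm0q, hKm.trans hm0K⟩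
      have hne : (entryOf stat m0).1 ≠ [] := by
        intro hnil
        have h1 : pvCanonical ((entryOf stat m0).1) = [] := by
          rw [hnil]; exact pvCanonical_nil
        have h2 : (entryOf stat q).1 = [] := by
          rw [← pvCanonical_eq_nil_iff]
          rw [← hm0K]; exact h1
        exact hD (countP_two stat m0 q hm0q hq hnil h2)
      exact h m0 hm0q ⟨hkm0, (cyc_iff_canonical _ _).mpr ⟨hne, hm0K⟩⟩
    · intro h i hi ⟨_, hcyc⟩
      exact h i hi ((cyc_iff_canonical _ _).mp hcyc).2

lemma main_eq (stat : List (List Int × Int)) (hD : ¬ D_remove_cyclomatic stat) :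
    remove_cyclomatic stat = remove_cyclomatic_alt stat := by
  rw [A_char, alt_eq_bGo, bGo_char]
  rw [List.filter_congr (fun q hq =>
    (kept_eq_bKeep stat hD q (List.mem_range.mp hq)))]
  rfl

lemma cyc_to_empty_false (x y : List Int) (hy : y = []) : is_cyclomatic x y = false := by
  rw [← Bool.not_eq_true, cyc_iff_canonical]
  rintro ⟨hx, hK⟩
  rw [hy, pvCanonical_nil, pvCanonical_eq_nil_iff] at hK
  exact hx hK

lemma kept_of_empty (stat : List (List Int × Int)) (q : Nat)
    (he : (entryOf stat q).1 = []) : keptA stat q = true := by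
  rw [keptA_eq_true_iff]
  rintro i _ ⟨_, hcyc⟩
  rw [cyc_to_empty_false _ _ he] at hcyc
  exact absurd hcyc (by simp)

lemma countP_range (l : List (List Int × Int)) (p : (List Int × Int) → Bool) :
    (List.range l.length).countP (fun q => p (l.getD q ([], 0))) = l.countP p := by
  induction l with
  | nil => simp
  | cons e rest ih =>
    rw [List.length_cons, List.range_succ_eq_map, List.countP_cons, List.countP_map]
    simp only [List.getD_cons_zero, List.getD_cons_succ, Function.comp_def, List.countP_cons]
    rw [ih]

lemma length_filter_le_one {p : Nat → Bool} (n : Nat)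
    (h : ∀ q1 q2, q1 < q2 → p q1 = true → p q2 = true → False) :
    ((List.range n).filter p).length ≤ 1 := by
  by_contra hlen
  push Not at hlen
  rcases hL : (List.range n).filter p with _ | ⟨q1, _ | ⟨q2, t⟩⟩
  · rw [hL] at hlen; simp at hlen
  · rw [hL] at hlen; simp at hlen
  · have hpw : ((List.range n).filter p).Pairwise (· < ·) :=
      (List.pairwise_lt_range).filter _
    rw [hL] at hpw
    have h1 : p q1 = true := by
      have hm : q1 ∈ (List.range n).filter p := by
        rw [hL]; exact List.mem_cons_self
      exact (List.mem_filter.mp hm).2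
    have h2 : p q2 = true := by
      have hm : q2 ∈ (List.range n).filter p := by
        rw [hL]; exact List.mem_cons_of_mem _ List.mem_cons_self
      exact (List.mem_filter.mp hm).2
    exact h q1 q2 ((List.pairwise_cons.mp hpw).1 q2 List.mem_cons_self) h1 h2

theorem tight_thm (stat : List (List Int × Int)) (hD : D_remove_cyclomatic stat) :
    remove_cyclomatic stat ≠ remove_cyclomatic_alt stat := by
  intro heq
  have hc := congrArg (List.countP (fun e : List Int × Int => e.1 == [])) heq
  rw [A_char, alt_eq_bGo, bGo_char, List.countP_map, List.countP_map] at hc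
  simp only [Function.comp_def] at hc
  rw [List.countP_filter, List.countP_filter] at hc
  simp only [entryOf] at hc
  have hA : (List.countP (fun q => ((stat.getD q ([], 0)).1 == []) && keptA stat q)
      (List.range stat.length)) = stat.countP (fun e => e.1 == []) := by
    rw [List.countP_congr (fun q _ => ?_), countP_range]
    constructor
    · rintro h1
      exact (Bool.and_eq_true _ _).mp h1 |>.1
    · intro h1
      rw [Bool.and_eq_true]
      exact ⟨h1, kept_of_empty stat q (by simpa [entryOf] using h1)⟩
  have hB : (List.countP (fun q => ((stat.getD q ([], 0)).1 == []) && bKeep [] stat q)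
      (List.range stat.length)) ≤ 1 := by
    rw [List.countP_eq_length_filter]
    apply length_filter_le_one
    intro q1 q2 hlt hp1 hp2
    simp only [Bool.and_eq_true, beq_iff_eq] at hp1 hp2
    have h3 := (bKeep_nil_iff stat q2).mp hp2.2 q1 hlt
    apply h3
    rw [show (entryOf stat q1).1 = [] from hp1.1, show (entryOf stat q2).1 = [] from hp2.1]
  rw [hA] at hc
  unfold D_remove_cyclomatic at hD
  omega


-- ===== VERDICT (by name: the statement is the Claim_ definition above) =====
theorem remove_cyclomatic_spec : Claim_unchanged_remove_cyclomatic := by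
  intro stat _ hD
  exact main_eq stat hD

theorem remove_cyclomatic_changed : Claim_changed_remove_cyclomatic := by
  unfold Claim_changed_remove_cyclomatic; decide

theorem remove_cyclomatic_tight : Claim_exact_remove_cyclomatic := by
  intro stat _ hD
  exact tight_thm stat hD
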